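-- pv_equiv track=rewrite | github.com/prashsub/databricks-health-monitor | src/dashboards/build_unified_dashboard.py | select_overview_page
-- ===== SOURCE A (Python) =====
-- from typing import List, Dict, Any, Optional, Set
--
-- def select_overview_page(dashboard: Dict[str, Any]) -> Optional[Dict]:
--     """
--     Select the main overview page from a multi-page dashboard.
--     For enriched dashboards, this is typically the first page with 'overview'
--     or the primary summary page.
--     """
--     pages = dashboard.get('pages', [])
--     if not pages:
--         return None
--
--     # Priority order for selecting pages
--     priority_keywords = ['overview', 'summary', 'executive', 'main', 'kpi']
--
--     # Try to find a page with priority keywords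
--     for keyword in priority_keywords:
--         for page in pages:
--             page_name = page.get('name', '').lower()
--             display_name = page.get('displayName', '').lower()
--             if keyword in page_name or keyword in display_name:
--                 return page
--
--     # Default to first page
--     return pages[0]
-- ===== SOURCE B (Python) =====
-- from typing import List, Dict, Any, Optional
--
-- def _rank(keywords, name, display_name):
--     # index of the first keyword contained in name or display_name, else len(keywords)
--     for i, kw in enumerate(keywords):
--         if kw in name or kw in display_name:
--             return i
--     return len(keywords)
--
-- def select_overview_page(dashboard: Dict[str, Any]) -> Optional[Dict]:
--     pages = dashboard.get('pages', [])
--     if not pages: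
--         return None
--     priority_keywords = ['overview', 'summary', 'executive', 'main', 'kpi']
--     sentinel = len(priority_keywords)
--     best_rank = sentinel
--     best_page = pages[0]
--     for page in pages:
--         r = _rank(priority_keywords,
--                   page.get('name', '').lower(),
--                   page.get('displayName', '').lower())
--         if r < best_rank:
--             best_rank = r
--             best_page = page
--     return best_page
-- ===== Notes on version B (the rewrite author's own statement) =====
-- stated objective: alternative
-- what changed: Replaced A's keyword-major nested scan (for each keyword, rescan the whole page list) by a single pass over the pages that computes each page's best keyword rank once and tracks the minimum with strict '<' so the earliest page at the best rank wins, falling back to the first page when no keyword matches.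
import Mathlib
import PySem

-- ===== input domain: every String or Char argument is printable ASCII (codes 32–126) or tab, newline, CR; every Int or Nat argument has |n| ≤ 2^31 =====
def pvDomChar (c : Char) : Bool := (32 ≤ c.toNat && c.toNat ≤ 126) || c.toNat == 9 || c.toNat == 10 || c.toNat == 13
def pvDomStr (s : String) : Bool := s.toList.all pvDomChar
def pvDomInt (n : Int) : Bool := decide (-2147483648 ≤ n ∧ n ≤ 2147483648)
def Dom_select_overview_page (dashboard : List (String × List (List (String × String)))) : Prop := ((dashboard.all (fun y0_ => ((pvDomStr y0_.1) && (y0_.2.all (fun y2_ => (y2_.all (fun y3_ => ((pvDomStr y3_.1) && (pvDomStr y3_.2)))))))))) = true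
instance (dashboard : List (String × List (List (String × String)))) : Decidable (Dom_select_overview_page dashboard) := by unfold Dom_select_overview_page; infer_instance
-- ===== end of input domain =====

-- B replaces A's keyword-major nested scan by a single pass over the pages that
-- tracks the best (lowest) keyword rank seen; objective: alternative (one pass over
-- the page list instead of one rescan per keyword; same measured cost).


-- ===== PORT A =====
-- 'keyword in page_name or keyword in display_name' for one page
def pvPageMatch (keyword : String) (page : List (String × String)) : Bool :=
  let page_name := PySem.Str.lower ((PySem.Dict.mk page).getD "name" "")
  let display_name := PySem.Str.lower ((PySem.Dict.mk page).getD "displayName" "")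
  PySem.Str.isIn keyword page_name || PySem.Str.isIn keyword display_name

-- inner 'for page in pages' loop with early return
def pvInnerLoop (keyword : String) : List (List (String × String)) → Option (List (String × String))
  | [] => none
  | page :: rest => if pvPageMatch keyword page then some page else pvInnerLoop keyword rest

-- outer 'for keyword in priority_keywords' loop
def pvOuterLoop : List String → List (List (String × String)) → Option (List (String × String))
  | [], _ => none
  | keyword :: kws, pages =>
    match pvInnerLoop keyword pages with
    | some page => some page
    | none => pvOuterLoop kws pages

def select_overview_page (dashboard : List (String × List (List (String × String)))) : Option (List (String × String)) :=
  let pages := (PySem.Dict.mk dashboard).getD "pages" []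
  if pages = [] then none
  else
    let priority_keywords := ["overview", "summary", "executive", "main", "kpi"]
    match pvOuterLoop priority_keywords pages with
    | some page => some page
    | none => PySem.List.pyGet? pages 0   -- pages[0]; pages is nonempty here

-- ===== PORT B =====
-- _rank: index of the first keyword contained in name or display_name, else len(keywords)
def pvRank : List String → String → String → Nat
  | [], _, _ => 0
  | kw :: kws, name, display_name =>
    if PySem.Str.isIn kw name || PySem.Str.isIn kw display_name then 0
    else pvRank kws name display_name + 1

def pvPageRank (keywords : List String) (page : List (String × String)) : Nat :=
  pvRank keywords (PySem.Str.lower ((PySem.Dict.mk page).getD "name" ""))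
                  (PySem.Str.lower ((PySem.Dict.mk page).getD "displayName" ""))

def select_overview_page_alt (dashboard : List (String × List (List (String × String)))) : Option (List (String × String)) :=
  let pages := (PySem.Dict.mk dashboard).getD "pages" []
  match pages with
  | [] => none
  | p0 :: _ =>
    let priority_keywords := ["overview", "summary", "executive", "main", "kpi"]
    let sentinel := priority_keywords.length
    let best := pages.foldl
      (fun best page =>
        let r := pvPageRank priority_keywords page
        if r < best.1 then (r, page) else best)
      (sentinel, p0)
    some best.2

-- ===== PRECONDITION & SPEC =====
def Spec_select_overview_page (dashboard : List (String × List (List (String × String)))) (out : Option (List (String × String))) : Prop := out = select_overview_page_alt dashboard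
instance (dashboard : List (String × List (List (String × String)))) (out : Option (List (String × String))) : Decidable (Spec_select_overview_page dashboard out) := by unfold Spec_select_overview_page; infer_instance

-- ===== CLAIM (what is proved, stated in full; the proofs are below) =====
def Claim_equal_select_overview_page : Prop := ∀ (dashboard : List (String × List (List (String × String)))), Dom_select_overview_page dashboard → Spec_select_overview_page dashboard (select_overview_page dashboard)

-- ===== LEMMAS AND PROOFS =====

-- foldr-style minimum of 'key' over a list, with base value b
def pvMinKey {α : Type} (key : α → Nat) (b : Nat) : List α → Nat
  | [] => b
  | p :: ps => min (key p) (pvMinKey key b ps)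

theorem pvMinKey_le_mem {α : Type} (key : α → Nat) (b : Nat) {ps : List α} {q : α}
    (hq : q ∈ ps) : pvMinKey key b ps ≤ key q := by
  induction ps with
  | nil => cases hq
  | cons p ps ih =>
    rcases List.mem_cons.mp hq with h | h
    · subst h; simp [pvMinKey]
    · have := ih h; simp only [pvMinKey]; omega

theorem pvMinKey_base_le {α : Type} (key : α → Nat) {b c : Nat} (h : c ≤ b) (ps : List α) :
    pvMinKey key c ps = min c (pvMinKey key b ps) := by
  induction ps with
  | nil => simp only [pvMinKey]; omega
  | cons p ps ih => simp only [pvMinKey, ih]; omega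

theorem pvMinKey_shift {α : Type} (key key' : α → Nat) (b : Nat) (ps : List α)
    (h : ∀ p ∈ ps, key' p = key p + 1) :
    pvMinKey key' (b + 1) ps = pvMinKey key b ps + 1 := by
  induction ps with
  | nil => simp [pvMinKey]
  | cons p ps ih =>
    have hp := h p (List.mem_cons_self)
    have := ih (fun q hq => h q (List.mem_cons_of_mem _ hq))
    simp only [pvMinKey]; omega

theorem pvFind?_congr {α : Type} (l : List α) (p q : α → Bool)
    (h : ∀ a ∈ l, p a = q a) : l.find? p = l.find? q := by
  induction l with
  | nil => rfl
  | cons a l ih =>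
    have ha := h a (List.mem_cons_self)
    simp only [List.find?_cons, ha]
    cases q a
    · exact ih (fun b hb => h b (List.mem_cons_of_mem _ hb))
    · rfl

theorem pvMinKey_attained {α : Type} (key : α → Nat) {b : Nat} {ps : List α}
    (h : pvMinKey key b ps < b) :
    (ps.find? (fun p => key p == pvMinKey key b ps)).isSome := by
  induction ps with
  | nil => simp only [pvMinKey] at h; omega
  | cons p ps ih =>
    simp only [pvMinKey] at h ⊢
    by_cases hp : key p ≤ pvMinKey key b ps
    · have hmin : min (key p) (pvMinKey key b ps) = key p := by omega
      rw [hmin]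
      simp
    · have hmin : min (key p) (pvMinKey key b ps) = pvMinKey key b ps := by omega
      rw [hmin] at h ⊢
      have hne : (key p == pvMinKey key b ps) = false := by simp; omega
      simp only [List.find?_cons, hne]
      exact ih h

-- characterization of B's single-pass fold
theorem pvFoldB_char {α : Type} (key : α → Nat) (ps : List α) :
    ∀ (br : Nat) (bp : α),
    ps.foldl (fun best page => if key page < best.1 then (key page, page) else best) (br, bp)
      = if pvMinKey key br ps < br
        then (pvMinKey key br ps, (ps.find? (fun p => key p == pvMinKey key br ps)).getD bp)
        else (br, bp) := by
  induction ps with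
  | nil => intro br bp; simp [pvMinKey]
  | cons p ps ih =>
    intro br bp
    simp only [List.foldl_cons]
    by_cases hp : key p < br
    · simp only [if_pos hp]
      rw [ih (key p) p]
      have hM : pvMinKey key (key p) ps = min (key p) (pvMinKey key br ps) :=
        pvMinKey_base_le key (Nat.le_of_lt hp) ps
      have hMt : pvMinKey key br (p :: ps) = min (key p) (pvMinKey key br ps) := rfl
      have houter : pvMinKey key br (p :: ps) < br := by rw [hMt]; omega
      rw [if_pos houter]
      by_cases h2 : pvMinKey key (key p) ps < key p
      · rw [if_pos h2]
        have hsome := pvMinKey_attained key h2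
        have heq : pvMinKey key (key p) ps = pvMinKey key br (p :: ps) := by
          rw [hM, hMt]
        have hlt : pvMinKey key br (p :: ps) < key p := by rw [← heq]; exact h2
        rw [heq] at hsome ⊢
        have hne : (key p == pvMinKey key br (p :: ps)) = false := by simp; omega
        simp only [List.find?_cons, hne]
        obtain ⟨q, hq⟩ := Option.isSome_iff_exists.mp hsome
        rw [hq]
        simp
      · rw [if_neg h2]
        have hkeq : pvMinKey key br (p :: ps) = key p := by
          rw [hMt]; rw [hM] at h2; omega
        simp [hkeq]
    · simp only [if_neg hp]
      rw [ih br bp]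
      have hMt : pvMinKey key br (p :: ps) = min (key p) (pvMinKey key br ps) := rfl
      by_cases h2 : pvMinKey key br ps < br
      · rw [if_pos h2]
        have houter : pvMinKey key br (p :: ps) < br := by rw [hMt]; omega
        rw [if_pos houter]
        have heq : pvMinKey key br (p :: ps) = pvMinKey key br ps := by rw [hMt]; omega
        have hne : (key p == pvMinKey key br (p :: ps)) = false := by
          simp; omega
        rw [heq] at hne ⊢
        simp [hne]
      · rw [if_neg h2]
        have : ¬ pvMinKey key br (p :: ps) < br := by rw [hMt]; omega
        rw [if_neg this]

-- rank of a page w.r.t. a cons'ed keyword list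
theorem pvPageRank_cons (k : String) (ks : List String) (p : List (String × String)) :
    pvPageRank (k :: ks) p = if pvPageMatch k p then 0 else pvPageRank ks p + 1 := by
  simp [pvPageRank, pvRank, pvPageMatch]

theorem pvInner_eq_find? (k : String) (ps : List (List (String × String))) :
    pvInnerLoop k ps = ps.find? (pvPageMatch k) := by
  induction ps with
  | nil => rfl
  | cons p ps ih =>
    simp only [pvInnerLoop, List.find?_cons]
    cases h : pvPageMatch k p <;> simp [ih]

-- characterization of A's keyword-major double loop
theorem pvOuter_char (ks : List String) (ps : List (List (String × String))) :
    pvOuterLoop ks ps =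
      if pvMinKey (pvPageRank ks) ks.length ps < ks.length
      then ps.find? (fun p => pvPageRank ks p == pvMinKey (pvPageRank ks) ks.length ps)
      else none := by
  induction ks with
  | nil =>
    have : ¬ pvMinKey (pvPageRank []) 0 ps < 0 := by omega
    simp [pvOuterLoop, this]
  | cons k ks ih =>
    simp only [pvOuterLoop, pvInner_eq_find?]
    cases hfind : ps.find? (pvPageMatch k) with
    | some p =>
      have hmem := List.mem_of_find?_eq_some hfind
      have hmatch : pvPageMatch k p = true := List.find?_some hfind
      have hrank0 : pvPageRank (k :: ks) p = 0 := by rw [pvPageRank_cons, hmatch]; simp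
      have hM0 : pvMinKey (pvPageRank (k :: ks)) (k :: ks).length ps = 0 := by
        have := pvMinKey_le_mem (pvPageRank (k :: ks)) (k :: ks).length hmem
        omega
      rw [hM0]
      have hlt : (0 : Nat) < (k :: ks).length := by simp
      rw [if_pos hlt]
      rw [pvFind?_congr ps _ (pvPageMatch k)]
      · exact hfind.symm ▸ rfl
      · intro a _
        rw [pvPageRank_cons]
        cases h : pvPageMatch k a <;> simp
    | none =>
      have hnone : ∀ p ∈ ps, ¬ pvPageMatch k p = true := by
        intro p hp; exact List.find?_eq_none.mp hfind p hp
      have hshift : ∀ p ∈ ps, pvPageRank (k :: ks) p = pvPageRank ks p + 1 := by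
        intro p hp
        rw [pvPageRank_cons]
        simp [Bool.not_eq_true] at hnone
        rw [hnone p hp]
        simp
      have hM : pvMinKey (pvPageRank (k :: ks)) (ks.length + 1) ps
          = pvMinKey (pvPageRank ks) ks.length ps + 1 :=
        pvMinKey_shift (pvPageRank ks) (pvPageRank (k :: ks)) ks.length ps hshift
      have hlen : (k :: ks).length = ks.length + 1 := rfl
      rw [ih, hlen, hM]
      by_cases h2 : pvMinKey (pvPageRank ks) ks.length ps < ks.length
      · rw [if_pos h2, if_pos (by omega)]
        apply pvFind?_congr
        intro a ha
        rw [hshift a ha]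
        simp
      · rw [if_neg h2, if_neg (by omega)]

-- ===== VERDICT (by name: the statement is the Claim_ definition above) =====
theorem select_overview_page_spec : Claim_equal_select_overview_page := by
  intro dashboard _
  unfold Spec_select_overview_page select_overview_page select_overview_page_alt
  cases hpages : (PySem.Dict.mk dashboard).getD "pages" [] with
  | nil => simp
  | cons p0 rest =>
    simp only []
    rw [if_neg (by simp)]
    have hlen : (["overview", "summary", "executive", "main", "kpi"] : List String).length = 5 := rfl
    rw [show ((["overview", "summary", "executive", "main", "kpi"] : List String).length, p0)
        = ((5 : Nat), p0) from by rw [hlen]]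
    rw [pvFoldB_char (pvPageRank ["overview", "summary", "executive", "main", "kpi"]) (p0 :: rest) 5 p0]
    rw [pvOuter_char, hlen]
    by_cases hM : pvMinKey (pvPageRank ["overview", "summary", "executive", "main", "kpi"]) 5 (p0 :: rest) < 5
    · rw [if_pos hM, if_pos hM]
      obtain ⟨q, hq⟩ := Option.isSome_iff_exists.mp
        (pvMinKey_attained (pvPageRank ["overview", "summary", "executive", "main", "kpi"]) hM)
      rw [hq]
      rfl
    · rw [if_neg hM, if_neg hM]
      simp [PySem.List.pyGet?, PySem.List.pyIdx?]
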